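-- pv_equiv track=rewrite | github.com/Ensembl/ensembl-web-track-api | tracks/views.py | bin_datasets_by_overlapping_specs
-- ===== SOURCE A (Python) =====
-- from collections import defaultdict
-- from typing import Dict, List, Set
--
-- def bin_datasets_by_overlapping_specs(
--         datasets: List[Dict],
--         dataset_specs: Dict[str, Set[str]]
-- ) -> List[List[Dict]]:
--     """
--     Bin datasets that share any specifications.
--     Uses Union-Find algorithm for efficient grouping.
--
--     Args:
--         datasets: List of dataset dicts with dataset_id and release_label
--         dataset_specs: Mapping of dataset_id -> set of spec names
--
--     Returns:
--         List of bins, where each bin is a list of dataset dicts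
--     """
--     # Build spec -> datasets mapping
--     spec_to_datasets = defaultdict(set)
--     for dataset in datasets:
--         dataset_id = str(dataset['dataset_id'])
--         specs = dataset_specs.get(dataset_id, set())
--         for spec in specs:
--             spec_to_datasets[spec].add(dataset_id)
--
--     # Union-Find: parent[dataset_id] = parent_dataset_id
--     parent = {str(d['dataset_id']): str(d['dataset_id']) for d in datasets}
--
--     def find(x):
--         if parent[x] != x:
--             parent[x] = find(parent[x])  # Path compression
--         return parent[x]
--
--     def union(x, y):
--         root_x = find(x)
--         root_y = find(y)
--         if root_x != root_y:
--             parent[root_y] = root_x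
--
--     # Union datasets that share specs
--     for spec, dataset_ids in spec_to_datasets.items():
--         dataset_list = list(dataset_ids)
--         for i in range(len(dataset_list) - 1):
--             union(dataset_list[i], dataset_list[i + 1])
--
--     # Group datasets by their root parent
--     bins = defaultdict(list)
--     for dataset in datasets:
--         dataset_id = str(dataset['dataset_id'])
--         root = find(dataset_id)
--         bins[root].append(dataset)
--
--     return list(bins.values())
-- ===== SOURCE B (Python) =====
-- def bin_datasets_by_overlapping_specs(datasets, dataset_specs):
--     """
--     Bin datasets that share any specifications.
--     Label-propagation re-implementation: instead of a parent forest with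
--     recursive find/path compression, keep a flat id -> component-label map
--     and relabel it wholesale whenever two components meet.
--     """
--     # spec -> dataset ids having it (distinct, in first-appearance order)
--     spec_to_datasets = {}
--     for dataset in datasets:
--         dataset_id = str(dataset['dataset_id'])
--         for spec in dataset_specs.get(dataset_id, set()):
--             members = spec_to_datasets.get(spec, [])
--             if dataset_id not in members:
--                 members = members + [dataset_id]
--             spec_to_datasets[spec] = members
--
--     # comp: dataset_id -> current component label
--     comp = {str(d['dataset_id']): str(d['dataset_id']) for d in datasets}
--     for members in spec_to_datasets.values():
--         for x, y in zip(members, members[1:]):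
--             a, b = comp[x], comp[y]
--             if a != b:
--                 comp = {k: (a if v == b else v) for k, v in comp.items()}
--
--     # group datasets by their component label
--     bins = {}
--     for dataset in datasets:
--         label = comp[str(dataset['dataset_id'])]
--         bins.setdefault(label, []).append(dataset)
--     return list(bins.values())
-- ===== Notes on version B (the rewrite author's own statement) =====
-- stated objective: alternative
-- what changed: Replaces A's union-find (parent forest with recursive find and path compression) by a flat id->component-label dict that is rewritten wholesale whenever two components meet, pairing neighbours with zip instead of index arithmetic; the final grouping pass is driven by direct label lookup instead of find calls.
import Mathlib
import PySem

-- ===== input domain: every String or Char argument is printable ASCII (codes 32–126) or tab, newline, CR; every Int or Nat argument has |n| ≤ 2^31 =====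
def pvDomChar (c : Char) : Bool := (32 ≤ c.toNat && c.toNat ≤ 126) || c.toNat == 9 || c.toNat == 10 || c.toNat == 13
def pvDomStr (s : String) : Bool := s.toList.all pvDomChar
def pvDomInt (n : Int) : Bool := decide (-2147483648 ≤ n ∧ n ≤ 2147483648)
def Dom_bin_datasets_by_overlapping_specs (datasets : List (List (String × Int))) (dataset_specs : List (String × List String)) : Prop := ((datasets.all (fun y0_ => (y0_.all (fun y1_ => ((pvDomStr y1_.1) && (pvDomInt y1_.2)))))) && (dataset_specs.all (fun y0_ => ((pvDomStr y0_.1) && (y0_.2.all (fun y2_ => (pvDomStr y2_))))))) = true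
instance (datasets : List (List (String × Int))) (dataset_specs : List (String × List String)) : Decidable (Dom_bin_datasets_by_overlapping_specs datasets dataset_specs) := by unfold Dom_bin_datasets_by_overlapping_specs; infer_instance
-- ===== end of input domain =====

-- B replaces A's recursive union-find (parent forest, find with path compression) by a flat
-- id -> component-label dict that is relabelled wholesale when two components meet: no recursion,
-- no mutation-during-lookup (objective: alternative; the return value is proved equal on Pre_).

-- ===== PORT A =====
-- str(dataset['dataset_id']); Pre_ guarantees the key is present, so the getD default is never read
def pvId (d : List (String × Int)) : String :=
  PySem.Int.toStr ((PySem.Dict.mk d).getD "dataset_id" 0)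

-- spec_to_datasets = defaultdict(set); spec_to_datasets[spec].add(dataset_id)
def pvSpecMapA (datasets : List (List (String × Int))) (dataset_specs : List (String × List String)) :
    PySem.Dict String (PySem.Set String) :=
  datasets.foldl (fun m d =>
    let i := pvId d
    ((PySem.Dict.mk dataset_specs).getD i PySem.Set.empty).foldl
      (fun m s => m.modify s PySem.Set.empty (fun st => PySem.Set.add st i)) m)
    PySem.Dict.empty

-- parent = {str(d['dataset_id']): str(d['dataset_id']) for d in datasets}
def pvParentInit (datasets : List (List (String × Int))) : PySem.Dict String String :=
  datasets.foldl (fun p d => p.insert (pvId d) (pvId d)) PySem.Dict.empty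

-- def find(x) with path compression; the fuel argument (dict size at each call) only makes the
-- recursion total — every call site reaches the root before exhausting it
def pvFindA : PySem.Dict String String → Nat → String → String × PySem.Dict String String
  | p, 0, x => (p.getD x x, p)
  | p, f+1, x =>
    let px := p.getD x x               -- parent[x] (the key is always present at call sites)
    if px ≠ x then
      let rp := pvFindA p f px         -- find(parent[x])
      (rp.1, rp.2.insert x rp.1)       -- parent[x] = find(parent[x]); return parent[x]
    else (px, p)

-- def union(x, y)
def pvUnionA (p : PySem.Dict String String) (x y : String) : PySem.Dict String String :=
  let fx := pvFindA p p.size x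
  let fy := pvFindA fx.2 fx.2.size y
  if fx.1 ≠ fy.1 then fy.2.insert fy.1 fx.1 else fy.2

-- for spec, dataset_ids in spec_to_datasets.items(): for i in range(len(...) - 1): union(...)
def pvUnionsA (m : PySem.Dict String (PySem.Set String)) (p : PySem.Dict String String) :
    PySem.Dict String String :=
  m.items.foldl (fun p kv =>
    (PySem.List.pyRange 0 ((kv.2.length : Int) - 1)).foldl
      (fun p i => pvUnionA p (PySem.List.pyGetD kv.2 i "") (PySem.List.pyGetD kv.2 (i+1) "")) p) p

-- bins = defaultdict(list); bins[find(id)].append(dataset); list(bins.values())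
def pvGroupA (datasets : List (List (String × Int))) (p : PySem.Dict String String) :
    List (List (List (String × Int))) :=
  (datasets.foldl
    (fun (st : PySem.Dict String (List (List (String × Int))) × PySem.Dict String String) d =>
      let rp := pvFindA st.2 st.2.size (pvId d)
      (st.1.modify rp.1 [] (fun l => l ++ [d]), rp.2))
    (PySem.Dict.empty, p)).1.values

def bin_datasets_by_overlapping_specs (datasets : List (List (String × Int))) (dataset_specs : List (String × List String)) : List (List (List (String × Int))) :=
  pvGroupA datasets (pvUnionsA (pvSpecMapA datasets dataset_specs) (pvParentInit datasets))

-- ===== PORT B =====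
-- spec_to_datasets[spec] = distinct ids having spec, in first-appearance order
def pvSpecMapB (datasets : List (List (String × Int))) (dataset_specs : List (String × List String)) :
    PySem.Dict String (List String) :=
  datasets.foldl (fun m d =>
    let i := pvId d
    ((PySem.Dict.mk dataset_specs).getD i []).foldl
      (fun m s =>
        let members := m.getD s []
        m.insert s (if i ∈ members then members else members ++ [i])) m)
    PySem.Dict.empty

-- comp = {str(d['dataset_id']): str(d['dataset_id']) for d in datasets}
def pvCompInit (datasets : List (List (String × Int))) : PySem.Dict String String :=
  datasets.foldl (fun c d => c.insert (pvId d) (pvId d)) PySem.Dict.empty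

-- the loop body: a, b = comp[x], comp[y]; if a != b: comp = {k: a if v == b else v ...}
def pvRelabel (c : PySem.Dict String String) (x y : String) : PySem.Dict String String :=
  let a := c.getD x ""
  let b := c.getD y ""
  if a ≠ b then PySem.Dict.mk (c.items.map (fun kv => (kv.1, if kv.2 = b then a else kv.2))) else c

-- for members in spec_to_datasets.values(): for x, y in zip(members, members[1:]): ...
def pvMergeB (m : PySem.Dict String (List String)) (c : PySem.Dict String String) :
    PySem.Dict String String :=
  m.values.foldl (fun c members =>
    (members.zip members.tail).foldl (fun c xy => pvRelabel c xy.1 xy.2) c) c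

-- bins.setdefault(comp[id], []).append(dataset); list(bins.values())
def pvGroupB (datasets : List (List (String × Int))) (c : PySem.Dict String String) :
    List (List (List (String × Int))) :=
  (datasets.foldl (fun (bins : PySem.Dict String (List (List (String × Int)))) d =>
      let label := c.getD (pvId d) ""
      bins.insert label (bins.getD label [] ++ [d]))
    PySem.Dict.empty).values

def bin_datasets_by_overlapping_specs_alt (datasets : List (List (String × Int))) (dataset_specs : List (String × List String)) : List (List (List (String × Int))) :=
  pvGroupB datasets (pvMergeB (pvSpecMapB datasets dataset_specs) (pvCompInit datasets))

-- ===== PRECONDITION & SPEC =====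
-- Pre_ excludes exactly the inputs where a dataset dict lacks the 'dataset_id' key: there the
-- Python A raises KeyError (and B raises too).
def Pre_bin_datasets_by_overlapping_specs (datasets : List (List (String × Int))) (dataset_specs : List (String × List String)) : Prop :=
  ∀ d ∈ datasets, (PySem.Dict.mk d).contains "dataset_id" = true
instance (datasets : List (List (String × Int))) (dataset_specs : List (String × List String)) : Decidable (Pre_bin_datasets_by_overlapping_specs datasets dataset_specs) := by unfold Pre_bin_datasets_by_overlapping_specs; infer_instance

def pvWitness_bin_datasets_by_overlapping_specs : (List (List (String × Int))) × (List (String × List String)) :=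
  ([[("dataset_id", 1)], [("dataset_id", 2)], [("dataset_id", 3)]],
   [("1", ["a", "b"]), ("2", ["b"]), ("3", ["z"])])

def Spec_bin_datasets_by_overlapping_specs (datasets : List (List (String × Int))) (dataset_specs : List (String × List String)) (out : List (List (List (String × Int)))) : Prop := out = bin_datasets_by_overlapping_specs_alt datasets dataset_specs
instance (datasets : List (List (String × Int))) (dataset_specs : List (String × List String)) (out : List (List (List (String × Int)))) : Decidable (Spec_bin_datasets_by_overlapping_specs datasets dataset_specs out) := by unfold Spec_bin_datasets_by_overlapping_specs; infer_instance

-- ===== CLAIM (what is proved, stated in full; the proofs are below) =====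
def Claim_equal_bin_datasets_by_overlapping_specs : Prop := ∀ (datasets : List (List (String × Int))) (dataset_specs : List (String × List String)), Dom_bin_datasets_by_overlapping_specs datasets dataset_specs → Pre_bin_datasets_by_overlapping_specs datasets dataset_specs → Spec_bin_datasets_by_overlapping_specs datasets dataset_specs (bin_datasets_by_overlapping_specs datasets dataset_specs)

-- ===== LEMMAS AND PROOFS =====

-- lookup in a values-mapped dict
theorem pv_get?_mapVals (g : String → String) (l : List (String × String)) (k : String) :
    (PySem.Dict.mk (l.map (fun kv => (kv.1, g kv.2)))).get? k = ((PySem.Dict.mk l).get? k).map g := by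
  induction l with
  | nil => simp [PySem.Dict.get?]
  | cons h t ih =>
    simp only [List.map_cons]
    rw [PySem.Dict.get?_mk_cons, PySem.Dict.get?_mk_cons]
    by_cases hk : h.1 == k <;> simp [hk, ih]

theorem pv_relabel_contains (c : PySem.Dict String String) (x y k : String) :
    (pvRelabel c x y).contains k = c.contains k := by
  simp only [pvRelabel]
  split_ifs with h
  · have h1 := pv_get?_mapVals (fun w => if w = c.getD y "" then c.getD x "" else w) c.items k
    rw [show PySem.Dict.mk c.items = c from rfl] at h1
    rw [PySem.Dict.contains_eq_isSome_get?, PySem.Dict.contains_eq_isSome_get?, h1]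
    simp
  · rfl

theorem pv_relabel_getD (c : PySem.Dict String String) (x y k : String)
    (hk : c.contains k = true) :
    (pvRelabel c x y).getD k "" =
      (if c.getD x "" ≠ c.getD y "" then
        (if c.getD k "" = c.getD y "" then c.getD x "" else c.getD k "") else c.getD k "") := by
  rw [PySem.Dict.contains_eq_isSome_get?] at hk
  obtain ⟨v, hv⟩ := Option.isSome_iff_exists.mp hk
  have hgd : c.getD k "" = v := PySem.Dict.getD_of_get?_eq_some _ "" hv
  have h1 := pv_get?_mapVals (fun w => if w = c.getD y "" then c.getD x "" else w) c.items k
  rw [show PySem.Dict.mk c.items = c from rfl] at h1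
  by_cases h : c.getD x "" ≠ c.getD y ""
  · rw [if_pos h]
    have h2 : pvRelabel c x y = PySem.Dict.mk (c.items.map
        (fun kv => (kv.1, if kv.2 = c.getD y "" then c.getD x "" else kv.2))) := by
      simp only [pvRelabel, if_pos h]
    rw [h2, PySem.Dict.getD_eq_get?_getD, h1, hv, hgd]
    simp
  · rw [if_neg h]
    have h2 : pvRelabel c x y = c := by simp only [pvRelabel, if_neg h]
    rw [h2]
-- The coupling invariant: p is A's parent forest, c is B's flat label map, m a termination
-- measure on the forest.  Roots carry their own name as label and measure 0; every parent edge
-- preserves the label and strictly decreases the measure.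
def pvGoodM (p c : PySem.Dict String String) (m : String → Nat) : Prop :=
  (∀ k, p.contains k = c.contains k) ∧
  (∀ k v, p.get? k = some v →
     p.contains v = true ∧ c.getD v "" = c.getD k "" ∧
     (v ≠ k → m v < m k) ∧ (v = k → m k = 0 ∧ c.getD k "" = k))

theorem pv_size_eq_keys_length (p : PySem.Dict String String) : p.size = p.keys.length := by
  simp [PySem.Dict.size, PySem.Dict.keys]

theorem pv_card_filter_lt_size (p : PySem.Dict String String) (m : String → Nat) (x : String)
    (hx : p.contains x = true) :
    (p.keys.toFinset.filter (fun k => m k < m x)).card < p.size := by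
  have hxk : x ∈ p.keys.toFinset := by
    rw [List.mem_toFinset]
    exact (PySem.Dict.contains_iff_mem_keys p x).mp hx
  have hsub : p.keys.toFinset.filter (fun k => m k < m x) ⊆ p.keys.toFinset.erase x := by
    intro k hk
    rw [Finset.mem_filter] at hk
    rcases hk with ⟨hk1, hk2⟩
    refine Finset.mem_erase.mpr ⟨?_, hk1⟩
    rintro rfl; omega
  calc (p.keys.toFinset.filter (fun k => m k < m x)).card
      ≤ (p.keys.toFinset.erase x).card := Finset.card_le_card hsub
    _ < p.keys.toFinset.card := Finset.card_erase_lt_of_mem hxk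
    _ ≤ p.keys.length := List.toFinset_card_le _
    _ = p.size := (pv_size_eq_keys_length p).symm

-- find returns B's label for x and keeps the invariant (path compression only rewires edges
-- inside one component, towards its root)
theorem pvFindA_spec (c : PySem.Dict String String) (m : String → Nat) :
    ∀ f p x, pvGoodM p c m → p.contains x = true →
      (p.keys.toFinset.filter (fun k => m k < m x)).card < f →
      ∃ p', pvFindA p f x = (c.getD x "", p') ∧ pvGoodM p' c m ∧
        p'.get? (c.getD x "") = some (c.getD x "") := by
  intro f
  induction f with
  | zero => intro p x _ _ hf; omega
  | succ f ih =>
    intro p x hg hx hf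
    have hx' : (p.get? x).isSome = true := by
      rw [← PySem.Dict.contains_eq_isSome_get?]; exact hx
    obtain ⟨px, hpx⟩ := Option.isSome_iff_exists.mp hx' 
    have hgetD : p.getD x x = px := PySem.Dict.getD_of_get?_eq_some _ x hpx
    obtain ⟨hvkey, hlab, hlt, hroot⟩ := hg.2 x px hpx
    by_cases hxx : px = x
    · subst hxx
      obtain ⟨hm0, hlabx⟩ := hroot rfl
      refine ⟨p, ?_, hg, ?_⟩
      · simp [pvFindA, hgetD, hlabx]
      · rw [hlabx]; exact hpx
    · have hmlt : m px < m x := hlt hxx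
      have hcard : (p.keys.toFinset.filter (fun k => m k < m px)).card < f := by
        have hpxmem : px ∈ p.keys.toFinset.filter (fun k => m k < m x) := by
          rw [Finset.mem_filter, List.mem_toFinset]
          exact ⟨(PySem.Dict.contains_iff_mem_keys p px).mp hvkey, hmlt⟩
        have hss : p.keys.toFinset.filter (fun k => m k < m px) ⊂
            p.keys.toFinset.filter (fun k => m k < m x) := by
          rw [Finset.ssubset_def]
          constructor
          · intro k hk
            rw [Finset.mem_filter] at hk ⊢
            exact ⟨hk.1, by omega⟩
          · intro hsub
            have := hsub hpxmem
            rw [Finset.mem_filter] at this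
            omega
        have := Finset.card_lt_card hss
        omega
      obtain ⟨p', hfind, hg', hroot'⟩ := ih p px hg hvkey hcard
      have hr : c.getD px "" = c.getD x "" := hlab
      obtain ⟨hrk, hrlab, _, hrroot⟩ := hg'.2 _ _ hroot'
      obtain ⟨hm0, hlabr⟩ := hrroot rfl
      have hmx : 0 < m x := by omega
      have hrne : c.getD px "" ≠ x := by
        intro h; rw [h] at hm0; omega
      refine ⟨p'.insert x (c.getD x ""), ?_, ⟨?_, ?_⟩, ?_⟩
      · simp [pvFindA, hgetD, hxx, hfind, hr]
      · -- contains agrees with c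
        intro k
        rw [PySem.Dict.contains_insert]
        by_cases hk : k = x
        · subst hk
          have : c.contains k = true := by rw [← hg.1 k]; exact hx
          simp [this]
        · rw [beq_eq_false_iff_ne.mpr hk, Bool.false_or]
          exact hg'.1 k
      · -- the edge clauses
        intro k v hkv
        rw [PySem.Dict.get?_insert] at hkv
        by_cases hk : k = x
        · subst hk
          rw [if_pos rfl] at hkv
          injection hkv with hv; subst hv
          rw [← hr] at *
          refine ⟨?_, ?_, ?_, ?_⟩
          · rw [PySem.Dict.contains_insert]
            simp only [Bool.or_eq_true, beq_iff_eq]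
            right; exact hrk
          · rw [hlabr, hr]
          · intro _; omega
          · intro h; exact absurd h hrne
        · rw [if_neg hk] at hkv
          obtain ⟨h1, h2, h3, h4⟩ := hg'.2 k v hkv
          refine ⟨?_, h2, h3, h4⟩
          rw [PySem.Dict.contains_insert]
          simp [h1]
      · -- the returned root is a root of the compressed forest
        rw [← hr, PySem.Dict.get?_insert, if_neg hrne]
        exact hroot' 
-- one union(x, y) of A corresponds to one relabelling step of B
theorem pvUnionA_spec (p c : PySem.Dict String String) (m : String → Nat) (x y : String)
    (hg : pvGoodM p c m) (hx : c.contains x = true) (hy : c.contains y = true) :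
    ∃ m', pvGoodM (pvUnionA p x y) (pvRelabel c x y) m' := by
  have hpx : p.contains x = true := by rw [hg.1]; exact hx
  obtain ⟨p1, hf1, hg1, hr1⟩ := pvFindA_spec c m p.size p x hg hpx
    (pv_card_filter_lt_size p m x hpx)
  have hp1y : p1.contains y = true := by rw [hg1.1]; exact hy
  obtain ⟨p2, hf2, hg2, hr2⟩ := pvFindA_spec c m p1.size p1 y hg1 hp1y
    (pv_card_filter_lt_size p1 m y hp1y)
  obtain ⟨hp1a, halab', _, haroot⟩ := hg1.2 _ _ hr1
  obtain ⟨hma, halab⟩ := haroot rfl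
  obtain ⟨hp2b, hblab', _, hbroot⟩ := hg2.2 _ _ hr2
  obtain ⟨hmb, hblab⟩ := hbroot rfl
  have hca : c.contains (c.getD x "") = true := by rw [← hg1.1]; exact hp1a
  have hcb : c.contains (c.getD y "") = true := by rw [← hg2.1]; exact hp2b
  have hp2a : p2.contains (c.getD x "") = true := by rw [hg2.1]; exact hca
  have hunion : pvUnionA p x y =
      (if c.getD x "" ≠ c.getD y "" then p2.insert (c.getD y "") (c.getD x "") else p2) := by
    simp only [pvUnionA, hf1, hf2]
  by_cases hab : c.getD x "" = c.getD y ""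
  · refine ⟨m, ?_⟩
    rw [hunion, if_neg (by simp [hab])]
    have : pvRelabel c x y = c := by simp [pvRelabel, hab]
    rw [this]
    exact hg2
  · refine ⟨fun z => if c.getD z "" = c.getD y "" then m z + m (c.getD x "") + 1 else m z, ?_⟩
    rw [hunion, if_pos hab]
    have hcc : ∀ k, (pvRelabel c x y).contains k = c.contains k := pv_relabel_contains c x y
    have hgd : ∀ k, c.contains k = true → (pvRelabel c x y).getD k "" =
        (if c.getD k "" = c.getD y "" then c.getD x "" else c.getD k "") := by
      intro k hk
      rw [pv_relabel_getD c x y k hk, if_pos hab]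
    constructor
    · intro k
      rw [PySem.Dict.contains_insert, hcc]
      by_cases hk : k = c.getD y ""
      · subst hk; simp [hcb]
      · rw [beq_eq_false_iff_ne.mpr hk, Bool.false_or]
        exact hg2.1 k
    · intro k v hkv
      rw [PySem.Dict.get?_insert] at hkv
      by_cases hk : k = c.getD y ""
      · rw [if_pos hk] at hkv
        injection hkv with hv
        subst hk; subst hv
        refine ⟨?_, ?_, ?_, ?_⟩
        · rw [PySem.Dict.contains_insert]
          simp [hp2a]
        · rw [hgd _ hca, hgd _ hcb, halab, hblab, if_neg hab, if_pos rfl]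
        · intro _
          beta_reduce
          rw [halab, hblab, if_neg hab, if_pos rfl]
          omega
        · intro h; exact absurd h hab
      · rw [if_neg hk] at hkv
        obtain ⟨h1, h2, h3, h4⟩ := hg2.2 k v hkv
        have hck : c.contains k = true := by
          rw [← hg2.1, PySem.Dict.contains_eq_isSome_get?, hkv]; rfl
        have hcv : c.contains v = true := by rw [← hg2.1]; exact h1
        refine ⟨?_, ?_, ?_, ?_⟩
        · rw [PySem.Dict.contains_insert]
          simp [h1]
        · rw [hgd _ hcv, hgd _ hck, h2]
        · intro hne
          have := h3 hne
          beta_reduce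
          rw [h2]
          split_ifs <;> omega
        · intro hvk
          obtain ⟨hm0, hlab0⟩ := h4 hvk
          have hkb : c.getD k "" ≠ c.getD y "" := by rw [hlab0]; exact hk
          refine ⟨?_, ?_⟩
          · beta_reduce
            rw [hlab0, if_neg hk]
            exact hm0
          · rw [hgd _ hck, if_neg hkb, hlab0]
-- folding a whole pair sequence keeps the coupling
theorem pv_fold_pairs_good :
    ∀ (pairs : List (String × String)) (p c : PySem.Dict String String) (m : String → Nat),
      pvGoodM p c m → (∀ xy ∈ pairs, c.contains xy.1 = true ∧ c.contains xy.2 = true) →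
      ∃ m', pvGoodM (pairs.foldl (fun p xy => pvUnionA p xy.1 xy.2) p)
        (pairs.foldl (fun c xy => pvRelabel c xy.1 xy.2) c) m' := by
  intro pairs
  induction pairs with
  | nil => intro p c m hg _; exact ⟨m, hg⟩
  | cons xy rest ih =>
    intro p c m hg hmem
    obtain ⟨hx, hy⟩ := hmem xy (List.mem_cons_self)
    obtain ⟨m1, hg1⟩ := pvUnionA_spec p c m xy.1 xy.2 hg hx hy
    simp only [List.foldl_cons]
    refine ih _ _ m1 hg1 ?_
    intro ab hab
    obtain ⟨h1, h2⟩ := hmem ab (List.mem_cons_of_mem _ hab)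
    rw [pv_relabel_contains, pv_relabel_contains]
    exact ⟨h1, h2⟩

-- relabelling never changes the key set
theorem pv_fold_relabel_contains (pairs : List (String × String)) :
    ∀ (c : PySem.Dict String String) (k : String),
      (pairs.foldl (fun c xy => pvRelabel c xy.1 xy.2) c).contains k = c.contains k := by
  induction pairs with
  | nil => intro c k; rfl
  | cons xy rest ih =>
    intro c k
    simp only [List.foldl_cons]
    rw [ih, pv_relabel_contains]

-- the initial identity dict is self-coupled
theorem pv_init_id : ∀ (l : List (List (String × Int))) (d : PySem.Dict String String),
    (∀ k v, d.get? k = some v → v = k) →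
    (∀ k v, (l.foldl (fun p d => p.insert (pvId d) (pvId d)) d).get? k = some v → v = k) := by
  intro l
  induction l with
  | nil => intro d h; exact h
  | cons a rest ih =>
    intro d h
    refine ih _ ?_
    intro k v hkv
    rw [PySem.Dict.get?_insert] at hkv
    by_cases hk : k = pvId a
    · rw [if_pos hk] at hkv; injection hkv with hv; rw [hk, ← hv]
    · rw [if_neg hk] at hkv; exact h k v hkv

theorem pv_compInit_good (datasets : List (List (String × Int))) :
    pvGoodM (pvCompInit datasets) (pvCompInit datasets) (fun _ => 0) := by
  have hid : ∀ k v, (pvCompInit datasets).get? k = some v → v = k := by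
    intro k v
    exact fun h => pv_init_id datasets PySem.Dict.empty (by intro k v h; cases h) k v h
  constructor
  · intro k; rfl
  · intro k v hkv
    have hvk := hid k v hkv
    subst hvk
    refine ⟨?_, rfl, ?_, ?_⟩
    · rw [PySem.Dict.contains_eq_isSome_get?, hkv]; rfl
    · intro h; exact absurd rfl h
    · intro _
      exact ⟨rfl, PySem.Dict.getD_of_get?_eq_some _ "" hkv⟩

theorem pv_parentInit_eq (datasets : List (List (String × Int))) :
    pvParentInit datasets = pvCompInit datasets := rfl
-- phase 3: A's grouping by find equals B's grouping by label
theorem pv_group_fold_eq (c : PySem.Dict String String) (m : String → Nat) :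
    ∀ (l : List (List (String × Int)))
      (bins : PySem.Dict String (List (List (String × Int)))) (p : PySem.Dict String String),
      pvGoodM p c m → (∀ d ∈ l, c.contains (pvId d) = true) →
      (l.foldl (fun st d =>
          let rp := pvFindA st.2 st.2.size (pvId d)
          (st.1.modify rp.1 [] (fun l => l ++ [d]), rp.2)) (bins, p)).1 =
      l.foldl (fun bins d =>
          let label := c.getD (pvId d) ""
          bins.insert label (bins.getD label [] ++ [d])) bins := by
  intro l
  induction l with
  | nil => intro bins p _ _; rfl
  | cons d rest ih =>
    intro bins p hg hmem
    have hpx : p.contains (pvId d) = true := by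
      rw [hg.1]; exact hmem d List.mem_cons_self
    obtain ⟨p', hfind, hg', _⟩ := pvFindA_spec c m p.size p (pvId d) hg hpx
      (pv_card_filter_lt_size p m (pvId d) hpx)
    simp only [List.foldl_cons, hfind]
    exact ih _ p' hg' (fun e he => hmem e (List.mem_cons_of_mem _ he))

theorem pv_group_eq (datasets : List (List (String × Int))) (p c : PySem.Dict String String)
    (m : String → Nat) (hg : pvGoodM p c m)
    (hmem : ∀ d ∈ datasets, c.contains (pvId d) = true) :
    pvGroupA datasets p = pvGroupB datasets c := by
  unfold pvGroupA pvGroupB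
  rw [pv_group_fold_eq c m datasets PySem.Dict.empty p hg hmem]
-- range(len-1) indexing produces exactly zip(l, l[1:])
theorem pv_chain_map (l : List String) :
    (PySem.List.pyRange 0 ((l.length : Int) - 1)).map
      (fun i => (PySem.List.pyGetD l i "", PySem.List.pyGetD l (i+1) "")) = l.zip l.tail := by
  cases l with
  | nil => decide
  | cons a t =>
    have hlen : ((a :: t).length : Int) - 1 = ((t.length : Nat) : Int) := by
      simp
    rw [hlen, PySem.List.pyRange_zero_natCast, List.map_map]
    apply List.ext_getElem
    · simp [List.length_zip]
    · intro i h1 h2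
      simp only [List.getElem_map, List.getElem_range, Function.comp_apply, List.getElem_zip]
      have hi : i < t.length := by simpa using h1
      have hi1 : i < (a :: t).length := by simp only [List.length_cons]; omega
      have hi2 : i + 1 < (a :: t).length := by simp only [List.length_cons]; omega
      have c1 : PySem.List.pyGetD (a :: t) ((i : Nat) : Int) "" = (a :: t)[i]'hi1 := by
        rw [PySem.List.pyGetD_natCast]
        exact List.getD_eq_getElem _ _ hi1
      have c2 : PySem.List.pyGetD (a :: t) (((i : Nat) : Int) + 1) "" = (a :: t)[i+1]'hi2 := by
        have hc : ((i : Nat) : Int) + 1 = (((i+1 : Nat)) : Int) := by push_cast; ring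
        rw [hc, PySem.List.pyGetD_natCast]
        exact List.getD_eq_getElem _ _ hi2
      rw [c1, c2]
      simp
-- phase 1: A's defaultdict-of-sets build equals B's list build
theorem pv_specmap_eq (datasets : List (List (String × Int))) (dataset_specs : List (String × List String)) :
    pvSpecMapA datasets dataset_specs = pvSpecMapB datasets dataset_specs := by
  simp only [pvSpecMapA, pvSpecMapB]
  congr 1
  funext m d
  congr 1
  funext m' s
  rw [show m'.modify s PySem.Set.empty (fun st => PySem.Set.add st (pvId d)) =
      m'.insert s (PySem.Set.add (m'.getD s PySem.Set.empty) (pvId d)) from rfl,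
    PySem.Set.add_eq_ite]
  rfl

-- every id stored in the spec map comes from the dataset list
theorem pv_specmap_vals_sub (P : String → Prop) :
    ∀ (l : List (List (String × Int))) (dataset_specs : List (String × List String))
      (m0 : PySem.Dict String (List String)),
      (∀ v ∈ m0.values, ∀ x ∈ v, P x) → (∀ d ∈ l, P (pvId d)) →
      ∀ v ∈ (l.foldl (fun m d =>
          ((PySem.Dict.mk dataset_specs).getD (pvId d) []).foldl
            (fun m s =>
              m.insert s (if pvId d ∈ m.getD s [] then m.getD s [] else m.getD s [] ++ [pvId d])) m)
          m0).values, ∀ x ∈ v, P x := by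
  intro l
  induction l with
  | nil => intro _ _ h _; exact h
  | cons d rest ih =>
    intro dataset_specs m0 h0 hP
    simp only [List.foldl_cons]
    refine ih dataset_specs _ ?_ (fun e he => hP e (List.mem_cons_of_mem _ he))
    have hPd : P (pvId d) := hP d List.mem_cons_self
    generalize (PySem.Dict.mk dataset_specs).getD (pvId d) [] = ss
    induction ss generalizing m0 with
    | nil => exact h0
    | cons s rest2 ih2 =>
      simp only [List.foldl_cons]
      refine ih2 _ ?_
      intro v hv x hx
      rcases PySem.Dict.mem_values_insert _ _ _ _ hv with hvv | hvm
      · subst hvv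
        have hmem : ∀ z ∈ m0.getD s [], P z := by
          intro z hz
          rcases h : m0.get? s with _ | w
          · rw [PySem.Dict.getD_of_get?_eq_none _ _ h] at hz
            cases hz
          · rw [PySem.Dict.getD_of_get?_eq_some _ _ h] at hz
            refine h0 w ?_ z hz
            have := PySem.Dict.mem_items_of_get?_eq_some _ h
            exact List.mem_map.mpr ⟨(s, w), this, rfl⟩
        split at hx
        · exact hmem x hx
        · rcases List.mem_append.mp hx with h1 | h1
          · exact hmem x h1
          · rw [List.mem_singleton.mp h1]; exact hPd
      · exact h0 v hvm x hx

theorem pv_compInit_contains (datasets : List (List (String × Int))) (k : String) :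
    (pvCompInit datasets).contains k = true ↔ k ∈ datasets.map pvId := by
  unfold pvCompInit
  rw [PySem.Dict.contains_iff_mem_keys,
    PySem.Dict.keys_foldl_insert_key datasets pvId (fun _ x => pvId x) PySem.Dict.empty,
    PySem.Dict.keys_empty, PySem.Set.update_nil_left]
  exact PySem.Set.mem_ofList (y := k) (xs := datasets.map pvId)
-- both union phases are one fold over the same flattened pair sequence
theorem pv_unionsA_eq_pairs (M : PySem.Dict String (List String)) (p : PySem.Dict String String) :
    pvUnionsA M p = ((M.values.map (fun l => l.zip l.tail)).flatten).foldl
      (fun p xy => pvUnionA p xy.1 xy.2) p := by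
  unfold pvUnionsA
  rw [List.foldl_flatten, List.foldl_map]
  simp only [PySem.Dict.values]
  rw [List.foldl_map]
  congr 1
  funext p kv
  rw [← pv_chain_map kv.2, List.foldl_map]

theorem pv_mergeB_eq_pairs (M : PySem.Dict String (List String)) (c : PySem.Dict String String) :
    pvMergeB M c = ((M.values.map (fun l => l.zip l.tail)).flatten).foldl
      (fun c xy => pvRelabel c xy.1 xy.2) c := by
  unfold pvMergeB
  rw [List.foldl_flatten, List.foldl_map]

theorem pv_main (datasets : List (List (String × Int))) (dataset_specs : List (String × List String)) :
    bin_datasets_by_overlapping_specs datasets dataset_specs =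
    bin_datasets_by_overlapping_specs_alt datasets dataset_specs := by
  unfold bin_datasets_by_overlapping_specs bin_datasets_by_overlapping_specs_alt
  rw [pv_specmap_eq, pv_parentInit_eq, pv_unionsA_eq_pairs, pv_mergeB_eq_pairs]
  have hspecB : pvSpecMapB datasets dataset_specs =
      datasets.foldl (fun m d =>
        ((PySem.Dict.mk dataset_specs).getD (pvId d) []).foldl
          (fun m s =>
            m.insert s (if pvId d ∈ m.getD s [] then m.getD s [] else m.getD s [] ++ [pvId d])) m)
        PySem.Dict.empty := rfl
  have hvals : ∀ v ∈ (pvSpecMapB datasets dataset_specs).values, ∀ x ∈ v, x ∈ datasets.map pvId := by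
    rw [hspecB]
    refine pv_specmap_vals_sub _ datasets dataset_specs PySem.Dict.empty ?_ ?_
    · intro v hv; cases hv
    · intro d hd; exact List.mem_map.mpr ⟨d, hd, rfl⟩
  have hmemPairs : ∀ xy ∈ ((pvSpecMapB datasets dataset_specs).values.map
      (fun l => l.zip l.tail)).flatten,
      (pvCompInit datasets).contains xy.1 = true ∧ (pvCompInit datasets).contains xy.2 = true := by
    rintro ⟨x, y⟩ hxy
    rw [List.mem_flatten] at hxy
    obtain ⟨pl, hpl, hxy2⟩ := hxy
    rw [List.mem_map] at hpl
    obtain ⟨l, hl, rfl⟩ := hpl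
    obtain ⟨hx, hy⟩ := List.of_mem_zip hxy2
    constructor
    · rw [pv_compInit_contains]; exact hvals l hl x hx
    · rw [pv_compInit_contains]; exact hvals l hl y (List.tail_subset l hy)
  obtain ⟨mF, hgF⟩ := pv_fold_pairs_good _ (pvCompInit datasets) (pvCompInit datasets)
    (fun _ => 0) (pv_compInit_good datasets) hmemPairs
  refine pv_group_eq datasets _ _ mF hgF ?_
  intro d hd
  rw [pv_fold_relabel_contains, pv_compInit_contains]
  exact List.mem_map.mpr ⟨d, hd, rfl⟩

-- ===== VERDICT (by name: the statement is the Claim_ definition above) =====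
theorem bin_datasets_by_overlapping_specs_spec : Claim_equal_bin_datasets_by_overlapping_specs := by
  intro datasets dataset_specs _ _
  exact pv_main datasets dataset_specs
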